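-- pv_equiv track=rewrite | github.com/seismatica/PCC | 16/string_match_naive.py | return_matched_strings
-- ===== SOURCE A (Python) =====
-- def return_matched_strings(key_str, target_str):
--     """
--     Return potential (not exhaustive) matched substrings between 2 strings
--     :param key_str: Shorter string where fragments are generated and looked up in the target string
--     :param target_str: Longer string in which the key string fragments are looked up against
--     :return: List of potential matched substrings that will include the longest match
--     """
--     matched_strings = []
--     highest_length = 0
--     # Fragments start from 0 and get successively smaller (by incrementing the starting index)
--     for start in range(len(key_str)):
--         # For each start position, end of fragments start from end of string and get successively smaller
--         # (by decreasing the ending index)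
--         for end in range(len(key_str), start, -1):
--             # Check if a key string fragment of certain start and end points appear in the target string.
--             str_fragment = key_str[start:end]
--             if str_fragment in target_str:
--                 # If the string fragment is longer than the string fragments collected thus far, store it and update
--                 # the highest length
--                 if len(str_fragment) >= highest_length:
--                     matched_strings.append(str_fragment)
--                     highest_length = len(str_fragment)
--                 # Skip the rest of the end point permutations and move to the next start point permutation
--                 break
--     return matched_strings
-- ===== SOURCE B (Python) =====
-- def return_matched_strings(key_str, target_str):
--     """For each start position, extend the match one character at a time
--     (upward scan) instead of scanning candidate end points downward;
--     substring containment is monotone in the fragment length, so the first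
--     failure ends the extension at the longest match."""
--     matched_strings = []
--     highest_length = 0
--     n = len(key_str)
--     for start in range(n):
--         length = 0
--         while start + length < n and key_str[start:start + length + 1] in target_str:
--             length += 1
--         if length > 0 and length >= highest_length:
--             matched_strings.append(key_str[start:start + length])
--             highest_length = length
--     return matched_strings
-- ===== Notes on version B (the rewrite author's own statement) =====
-- stated objective: faster
-- what changed: Instead of trying end points downward from the full key length and breaking at the first hit, B grows each fragment upward one character at a time and stops at the first containment failure; by monotonicity of substring containment in fragment length this finds the same longest match per start, so per start it does O(match+1) containment tests instead of O(n-match).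
import Mathlib
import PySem

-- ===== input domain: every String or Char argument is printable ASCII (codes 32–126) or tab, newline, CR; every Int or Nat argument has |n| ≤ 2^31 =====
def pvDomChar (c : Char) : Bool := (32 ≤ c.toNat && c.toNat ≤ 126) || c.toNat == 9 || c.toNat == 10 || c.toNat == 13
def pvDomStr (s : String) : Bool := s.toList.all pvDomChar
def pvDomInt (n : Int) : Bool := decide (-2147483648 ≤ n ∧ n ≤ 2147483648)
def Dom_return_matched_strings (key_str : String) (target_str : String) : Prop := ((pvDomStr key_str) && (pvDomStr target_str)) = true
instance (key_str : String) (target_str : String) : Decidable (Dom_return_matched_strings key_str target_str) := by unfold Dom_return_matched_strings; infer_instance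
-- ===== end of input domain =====

-- B grows each fragment upward and stops at the first containment failure instead of
-- scanning end points downward from the full key length (objective: faster per start on typical inputs).

-- ===== PORT A =====
-- inner 'for end in range(len(key_str), start, -1): … break' loop of A: first matching end wins
def pvInnerA (k t : List Char) (start : Int) (acc : List String × Int) : List Int → List String × Int
  | [] => acc
  | e :: _rest =>
    if PySem.Chars.isIn (PySem.List.slice k (some start) (some e)) t then
      if acc.2 ≤ ((PySem.List.slice k (some start) (some e)).length : Int) then
        (acc.1 ++ [String.ofList (PySem.List.slice k (some start) (some e))],
         ((PySem.List.slice k (some start) (some e)).length : Int))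
      else acc
    else pvInnerA k t start acc _rest

def return_matched_strings (key_str : String) (target_str : String) : List String :=
  ((PySem.List.pyRange 0 ((key_str.toList.length : Int)) 1).foldl
    (fun acc start =>
      pvInnerA key_str.toList target_str.toList start acc
        (PySem.List.pyRange ((key_str.toList.length : Int)) start (-1)))
    ([], 0)).1

-- ===== PORT B =====
-- the 'while start + length < n and key_str[start:start+length+1] in target_str' loop of B
def pvExtendB (k t : List Char) (start : Nat) (len : Nat) : Nat :=
  if h : start + len < k.length ∧
      PySem.Chars.isIn (PySem.List.slice k (some (start : Int)) (some ((start + len + 1 : Nat) : Int))) t = true then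
    pvExtendB k t start (len + 1)
  else len
termination_by k.length - (start + len)
decreasing_by omega

-- per-start body of B's 'for start in range(n)' loop
def pvStepB (k t : List Char) (acc : List String × Int) (start : Nat) : List String × Int :=
  if 0 < pvExtendB k t start 0 ∧ acc.2 ≤ ((pvExtendB k t start 0 : Nat) : Int) then
    (acc.1 ++ [String.ofList (PySem.List.slice k (some (start : Int))
        (some ((start + pvExtendB k t start 0 : Nat) : Int)))],
     ((pvExtendB k t start 0 : Nat) : Int))
  else acc

def return_matched_strings_alt (key_str : String) (target_str : String) : List String :=
  ((List.range key_str.toList.length).foldl (pvStepB key_str.toList target_str.toList) ([], 0)).1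

-- ===== PRECONDITION & SPEC =====
def Spec_return_matched_strings (key_str : String) (target_str : String) (out : List String) : Prop := out = return_matched_strings_alt key_str target_str
instance (key_str : String) (target_str : String) (out : List String) : Decidable (Spec_return_matched_strings key_str target_str out) := by unfold Spec_return_matched_strings; infer_instance

-- ===== CLAIM (what is proved, stated in full; the proofs are below) =====
def Claim_equal_return_matched_strings : Prop := ∀ (key_str : String) (target_str : String), Dom_return_matched_strings key_str target_str → Spec_return_matched_strings key_str target_str (return_matched_strings key_str target_str)

-- ===== LEMMAS AND PROOFS =====

-- substring containment is monotone in the end point of the fragment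
theorem pvMono (k t : List Char) (s e e' : Nat) (hse : s ≤ e) (hee : e ≤ e')
    (h : PySem.Chars.isIn (PySem.List.slice k (some (s : Int)) (some ((e' : Nat) : Int))) t = true) :
    PySem.Chars.isIn (PySem.List.slice k (some (s : Int)) (some ((e : Nat) : Int))) t = true := by
  rw [PySem.Chars.isIn_iff_infix] at h ⊢
  rw [PySem.List.slice_toNat] at h ⊢
  simp only [Int.toNat_natCast] at h ⊢
  have heq : (k.drop s).take (e - s) = ((k.drop s).take (e' - s)).take (e - s) := by
    rw [List.take_take]; congr 1; omega
  rw [heq]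
  exact (List.take_prefix _ _).isInfix.trans h
  all_goals positivity

theorem pvFragLen (k : List Char) (s L : Nat) (h : s + L ≤ k.length) :
    (PySem.List.slice k (some (s : Int)) (some ((s + L : Nat) : Int))).length = L := by
  rw [PySem.List.slice_toNat]
  simp only [Int.toNat_natCast, List.length_take, List.length_drop]
  omega
  all_goals positivity

theorem pvExtendB_spec (k t : List Char) (s : Nat) : ∀ (d l : Nat), k.length - (s + l) ≤ d →
    l ≤ pvExtendB k t s l ∧
    ¬(s + pvExtendB k t s l < k.length ∧
        PySem.Chars.isIn (PySem.List.slice k (some (s : Int)) (some ((s + pvExtendB k t s l + 1 : Nat) : Int))) t = true) ∧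
    (l < pvExtendB k t s l →
        PySem.Chars.isIn (PySem.List.slice k (some (s : Int)) (some ((s + pvExtendB k t s l : Nat) : Int))) t = true) := by
  intro d
  induction d with
  | zero =>
    intro l hl
    rw [pvExtendB]
    have hcond : ¬(s + l < k.length ∧ PySem.Chars.isIn (PySem.List.slice k (some (s : Int)) (some ((s + l + 1 : Nat) : Int))) t = true) := by
      intro hc; exact absurd hc.1 (by omega)
    rw [dif_neg hcond]
    exact ⟨le_refl _, hcond, by omega⟩
  | succ d ih =>
    intro l hl
    rw [pvExtendB]
    by_cases hc : s + l < k.length ∧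
        PySem.Chars.isIn (PySem.List.slice k (some (s : Int)) (some ((s + l + 1 : Nat) : Int))) t = true
    · rw [dif_pos hc]
      obtain ⟨ih1, ih2, ih3⟩ := ih (l + 1) (by omega)
      refine ⟨by omega, ih2, ?_⟩
      intro _
      by_cases hlt : l + 1 < pvExtendB k t s (l + 1)
      · exact ih3 hlt
      · have : pvExtendB k t s (l + 1) = l + 1 := by omega
        rw [this]
        have := hc.2
        simpa using this
    · rw [dif_neg hc]
      exact ⟨le_refl _, hc, by omega⟩

theorem pvExtendB_le (k t : List Char) (s : Nat) : ∀ (d l : Nat), k.length - (s + l) ≤ d →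
    s + l ≤ k.length → s + pvExtendB k t s l ≤ k.length := by
  intro d
  induction d with
  | zero =>
    intro l hd hl
    rw [pvExtendB]
    have hcond : ¬(s + l < k.length ∧ PySem.Chars.isIn (PySem.List.slice k (some (s : Int)) (some ((s + l + 1 : Nat) : Int))) t = true) := by
      intro hc; exact absurd hc.1 (by omega)
    rw [dif_neg hcond]; exact hl
  | succ d ih =>
    intro l hd hl
    rw [pvExtendB]
    by_cases hc : s + l < k.length ∧
        PySem.Chars.isIn (PySem.List.slice k (some (s : Int)) (some ((s + l + 1 : Nat) : Int))) t = true
    · rw [dif_pos hc]; exact ih (l + 1) (by omega) (by omega)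
    · rw [dif_neg hc]; exact hl

-- A's descending scan skips every end point above the longest match
theorem pvInnerA_skip (k t : List Char) (s L : Nat) (acc : List String × Int) :
    ∀ (e0 : Nat), s + L ≤ e0 →
    (∀ e : Nat, s + L < e → e ≤ e0 →
      PySem.Chars.isIn (PySem.List.slice k (some (s : Int)) (some ((e : Nat) : Int))) t = false) →
    pvInnerA k t (s : Int) acc (PySem.List.pyRange ((e0 : Nat) : Int) ((s : Nat) : Int) (-1)) =
    pvInnerA k t (s : Int) acc (PySem.List.pyRange ((s + L : Nat) : Int) ((s : Nat) : Int) (-1)) := by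
  intro e0
  induction e0 using Nat.strong_induction_on with
  | _ e0 ih =>
    intro hle hno
    by_cases he : s + L = e0
    · rw [he]
    · have hlt : s + L < e0 := by omega
      rw [PySem.List.pyRange_neg_one_cons (by exact_mod_cast (by omega : (s : Int) < (e0 : Int)))]
      rw [pvInnerA]
      rw [hno e0 hlt (le_refl _)]
      simp only [Bool.false_eq_true, if_false]
      have hcast : ((e0 : Int) - 1) = (((e0 - 1 : Nat)) : Int) := by omega
      rw [hcast]
      exact ih (e0 - 1) (by omega) (by omega) (fun e h1 h2 => hno e h1 (by omega))

-- per-start equality of A's inner loop and B's while-extension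
theorem pvStep_eq (k t : List Char) (acc : List String × Int) (s : Nat) :
    pvInnerA k t (s : Int) acc (PySem.List.pyRange ((k.length : Nat) : Int) ((s : Nat) : Int) (-1)) =
    pvStepB k t acc s := by
  by_cases hs : s < k.length
  · obtain ⟨-, hstop, hsucc⟩ := pvExtendB_spec k t s (k.length - s) 0 (by omega)
    have hle : s + pvExtendB k t s 0 ≤ k.length := pvExtendB_le k t s (k.length - s) 0 (by omega) (by omega)
    set L := pvExtendB k t s 0 with hLdef
    have hno : ∀ e : Nat, s + L < e → e ≤ k.length →
        PySem.Chars.isIn (PySem.List.slice k (some (s : Int)) (some ((e : Nat) : Int))) t = false := by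
      intro e h1 h2
      by_contra hne
      have htrue : PySem.Chars.isIn (PySem.List.slice k (some (s : Int)) (some ((e : Nat) : Int))) t = true := by
        cases hval : PySem.Chars.isIn (PySem.List.slice k (some (s : Int)) (some ((e : Nat) : Int))) t
        · exact absurd hval hne
        · rfl
      have := pvMono k t s (s + L + 1) e (by omega) (by omega) htrue
      exact hstop ⟨by omega, this⟩
    rw [pvInnerA_skip k t s L acc k.length hle hno]
    by_cases hL : 0 < L
    · rw [PySem.List.pyRange_neg_one_cons (by exact_mod_cast (by omega : (s : Int) < ((s + L : Nat) : Int)))]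
      rw [pvInnerA]
      rw [hsucc hL]
      rw [pvStepB, ← hLdef]
      rw [if_pos rfl]
      rw [pvFragLen k s L hle]
      by_cases hacc : acc.2 ≤ (L : Int)
      · rw [if_pos hacc, if_pos ⟨hL, hacc⟩]
      · rw [if_neg hacc, if_neg (by intro hc; exact hacc hc.2)]
    · have hL0 : L = 0 := by omega
      rw [hL0, Nat.add_zero]
      rw [PySem.List.pyRange_neg_one_eq_nil (le_refl _)]
      rw [pvInnerA]
      rw [pvStepB, ← hLdef, hL0]
      rw [if_neg (by intro hc; exact absurd hc.1 (by omega))]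
  · -- start beyond the key: both sides leave the accumulator unchanged
    have hL0 : pvExtendB k t s 0 = 0 := by
      rw [pvExtendB]
      rw [dif_neg (by intro hc; exact absurd hc.1 (by omega))]
    rw [PySem.List.pyRange_neg_one_eq_nil (by exact_mod_cast (by omega : ((k.length : Nat) : Int) ≤ (s : Int)))]
    rw [pvInnerA]
    rw [pvStepB, hL0]
    rw [if_neg (by intro hc; exact absurd hc.1 (by omega))]

-- ===== VERDICT (by name: the statement is the Claim_ definition above) =====
theorem return_matched_strings_spec : Claim_equal_return_matched_strings := by
  intro key_str target_str _
  unfold Spec_return_matched_strings return_matched_strings return_matched_strings_alt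
  congr 1
  rw [PySem.List.pyRange_one]
  simp only [sub_zero, Int.toNat_natCast]
  rw [List.foldl_map]
  apply List.foldl_ext
  intro acc s _
  rw [zero_add]
  exact pvStep_eq key_str.toList target_str.toList acc s
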